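-- pv_equiv track=rewrite | github.com/holmes1313/Leetcode | Pool/2 Ma/OA/Flask marks.py | chooseFlask
-- ===== SOURCE A (Python) =====
-- import bisect
-- import collections
--
-- def chooseFlask(requirements, flaskTypes, markings):
--     flask_markings = collections.defaultdict(list)
--
--     for marking in markings:
--         flask_markings[marking[0]].append(marking[1])
--
--     max_req = max(requirements)
--     min_wast = float('inf')
--     best_flask_idx = -1
--     memo = {}
--     requirements.sort()
--     for i in range(flaskTypes):
--         markings = flask_markings[i]
--         if not markings or markings[-1] < max_req:
--             # flask i can't be used
--             continue
--
--         curr_waste = 0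
--         for j in range(len(markings)):
--             mark = markings[j]
--             # if markings[i] in memo:
--             #     curr_waste += memo[markings[i]]
--             if mark not in memo:
--                 memo[mark] = bisect.bisect_right(requirements, mark)
--             idx = memo[mark]
--             if j == 0:
--                 last_idx = 0
--             else:
--                 last_idx = memo[markings[j-1]]
--             for diff in range(last_idx, idx):
--                 curr_waste += (mark - requirements[diff])
--
--         if curr_waste < min_wast:
--             min_wast = curr_waste
--             best_flask_idx = i
--
--     return best_flask_idx
-- ===== SOURCE B (Python) =====
-- import bisect
-- import collections
--
-- def chooseFlask(requirements, flaskTypes, markings):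
--     # Note: like A, sorts `requirements` in place (same observable mutation).
--     groups = collections.defaultdict(list)
--     for m in markings:
--         groups[m[0]].append(m[1])
--     max_req = max(requirements)
--     requirements.sort()
--     # prefix sums of the sorted requirements: each marking's waste becomes a closed-form segment expression
--     pre = [0]
--     t = 0
--     for r in requirements:
--         t += r
--         pre.append(t)
--     best_idx = -1
--     best_waste = None
--     for i in range(flaskTypes):
--         ms = groups.get(i)
--         if ms and ms[-1] >= max_req:
--             waste = 0
--             last = 0
--             for mark in ms:
--                 idx = bisect.bisect_right(requirements, mark)
--                 if last < idx:
--                     waste += mark * (idx - last) - (pre[idx] - pre[last])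
--                 last = idx
--             if best_waste is None or waste < best_waste:
--                 best_waste = waste
--                 best_idx = i
--     return best_idx
-- ===== Notes on version B (the rewrite author's own statement) =====
-- stated objective: alternative
-- what changed: B precomputes prefix sums of the sorted requirements and replaces A's per-requirement inner waste loop (and its bisect memo dict) by a closed-form segment-waste expression per marking, keyed by bisect indices.
import Mathlib
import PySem

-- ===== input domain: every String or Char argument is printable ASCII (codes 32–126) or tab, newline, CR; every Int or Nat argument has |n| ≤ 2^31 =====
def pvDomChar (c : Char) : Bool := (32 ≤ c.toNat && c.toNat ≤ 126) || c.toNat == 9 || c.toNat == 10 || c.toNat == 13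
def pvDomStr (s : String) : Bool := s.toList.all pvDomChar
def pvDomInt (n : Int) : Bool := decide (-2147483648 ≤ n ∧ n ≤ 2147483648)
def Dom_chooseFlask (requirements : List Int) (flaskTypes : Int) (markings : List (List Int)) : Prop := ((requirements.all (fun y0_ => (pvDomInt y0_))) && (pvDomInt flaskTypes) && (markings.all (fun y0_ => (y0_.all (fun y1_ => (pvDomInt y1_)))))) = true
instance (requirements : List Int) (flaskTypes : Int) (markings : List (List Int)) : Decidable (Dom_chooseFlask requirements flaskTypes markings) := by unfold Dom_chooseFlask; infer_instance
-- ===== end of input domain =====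

-- Equivalence of two flask-choice implementations; B replaces A's per-requirement inner waste
-- loop and bisect memo by a closed-form segment waste from prefix sums of the sorted requirements.
-- Both Pythons sort `requirements` in place (same observable mutation); the claim is about the return value.


-- ===== PORT A =====
-- both Pythons build the flask→markings dict by the identical defaultdict-append loop, so the helper is shared
def groupByFlask (markings : List (List Int)) : PySem.Dict Int (List Int) :=
  markings.foldl
    (fun d m => d.modify ((PySem.List.pyGet? m 0).getD 0) []
      (fun l => l ++ [(PySem.List.pyGet? m 1).getD 0])) PySem.Dict.empty

-- A's inner `for j in range(len(markings))` loop, as structural recursion over the list;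
-- `prev` is markings[j-1] (none at j = 0), `memo` the shared bisect memo, `w` curr_waste
def chooseFlaskInner (sortedReq : List Int) :
    PySem.Dict Int Int → Int → Option Int → List Int → PySem.Dict Int Int × Int
  | memo, w, _, [] => (memo, w)
  | memo, w, prev, mark :: rest =>
    let memo := if (memo.get? mark).isNone
      then memo.insert mark ((PySem.List.bisectRight sortedReq mark : Nat) : Int)
      else memo
    let idx := (memo.get? mark).getD 0
    let lastIdx : Int := match prev with
      | none => 0
      | some p => (memo.get? p).getD 0
    let w := (PySem.List.pyRange lastIdx idx).foldl
      (fun w d => w + (mark - (PySem.List.pyGet? sortedReq d).getD 0)) w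
    chooseFlaskInner sortedReq memo w (some mark) rest

def chooseFlask (requirements : List Int) (flaskTypes : Int) (markings : List (List Int)) : Int :=
  let fm := groupByFlask markings
  let maxReq := ((PySem.List.max? requirements (fun x => x)).getD 0)
  let sortedReq := PySem.List.sorted requirements (fun x => x)
  let res := (PySem.List.pyRange 0 flaskTypes).foldl
    (fun (st : PySem.Dict Int Int × Option Int × Int) i =>
      let ms := fm.getD i []
      if ms.isEmpty || decide ((PySem.List.pyGet? ms (-1)).getD 0 < maxReq) then st
      else
        let r := chooseFlaskInner sortedReq st.1 0 none ms
        match st.2.1 with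
        | none => (r.1, some r.2, i)
        | some w => if r.2 < w then (r.1, some r.2, i) else (r.1, st.2.1, st.2.2))
    (PySem.Dict.empty, none, -1)
  res.2.2

-- ===== PORT B =====
-- prefix sums `pre` with running total `t`:  pre = [0]; for r in rs: t += r; pre.append(t)
def altPrefix (rs : List Int) : List Int :=
  (rs.foldl (fun (st : List Int × Int) r => (st.1 ++ [st.2 + r], st.2 + r)) ([0], 0)).1

-- B's O(1)-per-marking waste loop: `last` is the previous bisect index
def altWaste (sortedReq pre : List Int) : Int → Nat → List Int → Int
  | w, _, [] => w
  | w, last, mark :: rest =>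
    let idx := PySem.List.bisectRight sortedReq mark
    let w := if last < idx
      then w + (mark * ((idx : Int) - (last : Int)) - (pre.getD idx 0 - pre.getD last 0))
      else w
    altWaste sortedReq pre w idx rest

def chooseFlask_alt (requirements : List Int) (flaskTypes : Int) (markings : List (List Int)) : Int :=
  let fm := groupByFlask markings
  let maxReq := ((PySem.List.max? requirements (fun x => x)).getD 0)
  let sortedReq := PySem.List.sorted requirements (fun x => x)
  let pre := altPrefix sortedReq
  let res := (PySem.List.pyRange 0 flaskTypes).foldl
    (fun (st : Option Int × Int) i =>
      match fm.get? i with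
      | none => st
      | some ms =>
        if (!ms.isEmpty) && decide (maxReq ≤ (PySem.List.pyGet? ms (-1)).getD 0) then
          let waste := altWaste sortedReq pre 0 0 ms
          match st.1 with
          | none => (some waste, i)
          | some w => if waste < w then (some waste, i) else st
        else st)
    (none, -1)
  res.2

-- ===== PRECONDITION & SPEC =====
-- Pre_ excludes exactly the inputs where Python A raises: max() of an empty requirements
-- list (ValueError) and a marking with fewer than two entries (IndexError).
def Pre_chooseFlask (requirements : List Int) (flaskTypes : Int) (markings : List (List Int)) : Prop :=
  requirements ≠ [] ∧ ∀ m ∈ markings, 2 ≤ m.length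
instance (requirements : List Int) (flaskTypes : Int) (markings : List (List Int)) : Decidable (Pre_chooseFlask requirements flaskTypes markings) := by unfold Pre_chooseFlask; infer_instance
def pvWitness_chooseFlask : List Int × Int × List (List Int) := ([2, 1, 4], 3, [[0, 3], [0, 5], [1, 4], [2, 7]])

def Spec_chooseFlask (requirements : List Int) (flaskTypes : Int) (markings : List (List Int)) (out : Int) : Prop := out = chooseFlask_alt requirements flaskTypes markings
instance (requirements : List Int) (flaskTypes : Int) (markings : List (List Int)) (out : Int) : Decidable (Spec_chooseFlask requirements flaskTypes markings out) := by unfold Spec_chooseFlask; infer_instance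

-- ===== CLAIM (what is proved, stated in full; the proofs are below) =====
def Claim_equal_chooseFlask : Prop := ∀ (requirements : List Int) (flaskTypes : Int) (markings : List (List Int)), Dom_chooseFlask requirements flaskTypes markings → Pre_chooseFlask requirements flaskTypes markings → Spec_chooseFlask requirements flaskTypes markings (chooseFlask requirements flaskTypes markings)

-- ===== LEMMAS AND PROOFS =====

-- ===== lemmas =====
def psum (rs : List Int) (k : Nat) : Int := (rs.take k).sum

lemma psum_succ (rs : List Int) (l : Nat) (hl : l < rs.length) :
    psum rs (l + 1) = psum rs l + rs.getD l 0 := by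
  unfold psum
  rw [List.take_add_one, List.sum_append, List.getElem?_eq_getElem hl]
  simp [List.getD_eq_getElem?_getD, List.getElem?_eq_getElem hl]

lemma pyRange_nil (a b : Int) (h : b ≤ a) : PySem.List.pyRange a b = [] := by
  simp [PySem.List.pyRange]; omega

lemma sumseg (rs : List Int) (mark : Int) (n : Nat) : ∀ (l : Nat) (w : Int), l + n ≤ rs.length →
    (PySem.List.pyRange (l : Int) ((l + n : Nat) : Int)).foldl
      (fun w d => w + (mark - (PySem.List.pyGet? rs d).getD 0)) w
    = w + (mark * (n : Int) - (psum rs (l + n) - psum rs l)) := by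
  induction n with
  | zero => intro l w _; rw [pyRange_nil _ _ (by omega)]; simp
  | succ n ih =>
    intro l w h
    rw [PySem.List.pyRange_one_cons (by omega)]
    simp only [List.foldl_cons]
    have hcast : ((l : Int) + 1) = ((l + 1 : Nat) : Int) := by push_cast; ring
    have hcast2 : ((l + (n+1) : Nat) : Int) = (((l+1) + n : Nat) : Int) := by push_cast; ring
    rw [hcast, hcast2, ih (l+1) _ (by omega)]
    have hget : (PySem.List.pyGet? rs (l : Int)).getD 0 = rs.getD l 0 :=
      PySem.List.pyGetD_natCast rs l 0
    rw [hget]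
    have h1 : psum rs (l + 1) = psum rs l + rs.getD l 0 := psum_succ rs l (by omega)
    have h2 : l + 1 + n = l + (n + 1) := by omega
    rw [h2] at *
    rw [h1]; push_cast; ring

lemma sumseg_if (rs : List Int) (mark w : Int) (l i : Nat) (hl : l ≤ rs.length) (hi : i ≤ rs.length) :
    (PySem.List.pyRange (l : Int) (i : Int)).foldl
      (fun w d => w + (mark - (PySem.List.pyGet? rs d).getD 0)) w
    = if l < i then w + (mark * ((i : Int) - (l : Int)) - (psum rs i - psum rs l)) else w := by
  by_cases h : l < i
  · have : i = l + (i - l) := by omega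
    rw [this] at hi ⊢
    rw [sumseg rs mark (i - l) l w (by omega)]
    simp only [if_pos (by omega : l < l + (i - l))]
    push_cast [Nat.cast_sub (by omega : l ≤ i)]
    ring_nf
  · rw [pyRange_nil _ _ (by exact_mod_cast by omega : (i:Int) ≤ (l:Int))]
    simp [h]

def psums : Int → List Int → List Int
  | _, [] => []
  | s, r :: t => (s + r) :: psums (s + r) t

lemma fold_pre (l : List Int) : ∀ (acc : List Int) (s : Int),
    l.foldl (fun (st : List Int × Int) r => (st.1 ++ [st.2 + r], st.2 + r)) (acc, s)
    = (acc ++ psums s l, s + l.sum) := by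
  induction l with
  | nil => intro acc s; simp [psums]
  | cons r t ih =>
    intro acc s
    simp only [List.foldl_cons, ih, psums, List.sum_cons]
    rw [Prod.mk.injEq]
    refine ⟨by simp, by ring⟩

lemma psums_getD (l : List Int) : ∀ (s : Int) (j : Nat), j < l.length →
    (psums s l).getD j 0 = s + (l.take (j + 1)).sum := by
  induction l with
  | nil => intro s j h; simp at h
  | cons r t ih =>
    intro s j h
    cases j with
    | zero => simp [psums]
    | succ j =>
      simp only [psums, List.getD_cons_succ, List.take_succ_cons, List.sum_cons]
      rw [ih (s + r) j (by simpa using h)]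
      ring

lemma pre_getD (rs : List Int) (k : Nat) (hk : k ≤ rs.length) :
    (altPrefix rs).getD k 0 = psum rs k := by
  unfold altPrefix
  rw [fold_pre rs [0] 0]
  cases k with
  | zero => simp [psum]
  | succ k =>
    have hlt : k < rs.length := by omega
    simp only [List.cons_append, List.nil_append, List.getD_cons_succ]
    rw [psums_getD rs 0 k hlt]
    simp [psum]

def GoodMemo (rs : List Int) (memo : PySem.Dict Int Int) : Prop :=
  ∀ k v, memo.get? k = some v → v = ((PySem.List.bisectRight rs k : Nat) : Int)

def pidx (rs : List Int) : Option Int → Nat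
  | none => 0
  | some p => PySem.List.bisectRight rs p

lemma inner_eq (rs : List Int) (hs : List.Pairwise (fun a b => a ≤ b) rs) :
    ∀ (ms : List Int) (memo : PySem.Dict Int Int) (w : Int) (prev : Option Int),
    GoodMemo rs memo →
    (∀ p, prev = some p → (memo.get? p).isSome) →
    GoodMemo rs (chooseFlaskInner rs memo w prev ms).1 ∧
    (chooseFlaskInner rs memo w prev ms).2 = altWaste rs (altPrefix rs) w (pidx rs prev) ms := by
  intro ms
  induction ms with
  | nil => intro memo w prev hg _; exact ⟨hg, rfl⟩
  | cons mark rest ih =>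
    intro memo w prev hg hp
    simp only [chooseFlaskInner]
    set memo' := if (memo.get? mark).isNone
      then memo.insert mark ((PySem.List.bisectRight rs mark : Nat) : Int)
      else memo with hmemo'
    have hg' : GoodMemo rs memo' := by
      rw [hmemo']
      split
      · intro k v hkv
        by_cases hk : k = mark
        · subst hk; rw [PySem.Dict.get?_insert_self] at hkv; injection hkv with h; omega
        · rw [PySem.Dict.get?_insert_of_ne _ _ hk] at hkv; exact hg k v hkv
      · exact hg
    have hmark : memo'.get? mark = some ((PySem.List.bisectRight rs mark : Nat) : Int) := by
      rw [hmemo']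
      cases hcase : memo.get? mark with
      | none => simp [hcase, PySem.Dict.get?_insert_self]
      | some v => simp [hcase, hg mark v hcase]
    have hidx : (memo'.get? mark).getD 0 = ((PySem.List.bisectRight rs mark : Nat) : Int) := by
      rw [hmark]; rfl
    have hbound := (PySem.List.bisectRight_spec rs mark hs).1
    have step : ∀ (lastN : Nat), lastN ≤ rs.length →
        GoodMemo rs (chooseFlaskInner rs memo'
          ((PySem.List.pyRange (lastN : Int) ((PySem.List.bisectRight rs mark : Nat) : Int)).foldl
            (fun w d => w + (mark - (PySem.List.pyGet? rs d).getD 0)) w)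
          (some mark) rest).1 ∧
        (chooseFlaskInner rs memo'
          ((PySem.List.pyRange (lastN : Int) ((PySem.List.bisectRight rs mark : Nat) : Int)).foldl
            (fun w d => w + (mark - (PySem.List.pyGet? rs d).getD 0)) w)
          (some mark) rest).2 = altWaste rs (altPrefix rs) w lastN (mark :: rest) := by
      intro lastN hN
      have hih := ih memo'
        ((PySem.List.pyRange (lastN : Int) ((PySem.List.bisectRight rs mark : Nat) : Int)).foldl
          (fun w d => w + (mark - (PySem.List.pyGet? rs d).getD 0)) w) (some mark) hg'
        (by intro p hps; injection hps with h; subst h; rw [hmark]; rfl)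
      refine ⟨hih.1, ?_⟩
      rw [hih.2]
      simp only [altWaste, pidx]
      rw [sumseg_if rs mark w lastN (PySem.List.bisectRight rs mark) hN hbound]
      rw [pre_getD rs (PySem.List.bisectRight rs mark) hbound, pre_getD rs lastN hN]
    cases prev with
    | none =>
      have := step 0 (by omega)
      simpa [pidx, hidx] using this
    | some p =>
      have hsome := hp p rfl
      cases hcase : memo.get? p with
      | none => rw [hcase] at hsome; simp at hsome
      | some v =>
        have hv : memo'.get? p = some v := by
          rw [hmemo']; split
          · by_cases hpm : p = mark
            · subst hpm
              rename_i hnone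
              rw [hcase] at hnone; simp at hnone
            · rw [PySem.Dict.get?_insert_of_ne _ _ hpm]; exact hcase
          · exact hcase
        have hvv : v = ((PySem.List.bisectRight rs p : Nat) : Int) := hg p v hcase
        have hpb : PySem.List.bisectRight rs p ≤ rs.length := (PySem.List.bisectRight_spec rs p hs).1
        have := step (PySem.List.bisectRight rs p) hpb
        simp only [hidx, hv, hvv, Option.getD_some]
        simpa [pidx] using this

lemma outer_eq (fm : PySem.Dict Int (List Int)) (maxReq : Int) (rs : List Int)
    (hs : List.Pairwise (fun a b => a ≤ b) rs) :
    ∀ (L : List Int) (memo : PySem.Dict Int Int) (mw : Option Int) (best : Int),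
    GoodMemo rs memo →
    (L.foldl
      (fun (st : PySem.Dict Int Int × Option Int × Int) i =>
        let ms := fm.getD i []
        if ms.isEmpty || decide ((PySem.List.pyGet? ms (-1)).getD 0 < maxReq) then st
        else
          let r := chooseFlaskInner rs st.1 0 none ms
          match st.2.1 with
          | none => (r.1, some r.2, i)
          | some w => if r.2 < w then (r.1, some r.2, i) else (r.1, st.2.1, st.2.2))
      (memo, mw, best)).2
    = L.foldl
      (fun (st : Option Int × Int) i =>
        match fm.get? i with
        | none => st
        | some ms =>
          if (!ms.isEmpty) && decide (maxReq ≤ (PySem.List.pyGet? ms (-1)).getD 0) then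
            let waste := altWaste rs (altPrefix rs) 0 0 ms
            match st.1 with
            | none => (some waste, i)
            | some w => if waste < w then (some waste, i) else st
          else st)
      (mw, best) := by
  intro L
  induction L with
  | nil => intro memo mw best _; rfl
  | cons i t ih =>
    intro memo mw best hg
    simp only [List.foldl_cons]
    cases hfm : fm.get? i with
    | none =>
      have hms : fm.getD i [] = [] := by
        rw [PySem.Dict.getD_eq_get?_getD, hfm]; rfl
      simp only [hms, List.isEmpty_nil, Bool.true_or, if_pos]
      exact ih memo mw best hg
    | some ms =>
      have hms : fm.getD i [] = ms := by
        rw [PySem.Dict.getD_eq_get?_getD, hfm]; rfl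
      simp only [hms]
      by_cases hemp : ms.isEmpty
      · simp only [hemp, Bool.true_or, if_pos, Bool.not_true, Bool.false_and, if_neg,
          Bool.false_eq_true, not_false_eq_true]
        exact ih memo mw best hg
      · rcases lt_or_ge ((PySem.List.pyGet? ms (-1)).getD 0) maxReq with hlt | hge
        · have hA : (ms.isEmpty || decide ((PySem.List.pyGet? ms (-1)).getD 0 < maxReq)) = true := by
            simp [hlt]
          have hB : ((!ms.isEmpty) && decide (maxReq ≤ (PySem.List.pyGet? ms (-1)).getD 0)) = false := by
            simp [hemp]; omega
          simp only [hA, hB, if_true, Bool.false_eq_true, if_neg, not_false_eq_true]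
          exact ih memo mw best hg
        · have hinner := inner_eq rs hs ms memo 0 none hg (by intro p h; cases h)
          have hA : (ms.isEmpty || decide ((PySem.List.pyGet? ms (-1)).getD 0 < maxReq)) = false := by
            simp [hemp]; omega
          have hB : ((!ms.isEmpty) && decide (maxReq ≤ (PySem.List.pyGet? ms (-1)).getD 0)) = true := by
            simp [hemp]; omega
          simp only [hA, hB, if_true, Bool.false_eq_true, if_neg, not_false_eq_true]
          have hw : (chooseFlaskInner rs memo 0 none ms).2 = altWaste rs (altPrefix rs) 0 0 ms := by
            simpa [pidx] using hinner.2
          rw [← hw]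
          cases mw with
          | none => exact ih _ _ _ hinner.1
          | some w =>
            by_cases hless : (chooseFlaskInner rs memo 0 none ms).2 < w
            · simp only [hless, if_pos]
              exact ih _ _ _ hinner.1
            · simp only [hless, if_neg, not_false_eq_true]
              exact ih _ _ _ hinner.1

-- ===== VERDICT (by name: the statement is the Claim_ definition above) =====
theorem chooseFlask_spec : Claim_equal_chooseFlask := by
  intro requirements flaskTypes markings _ _
  unfold Spec_chooseFlask
  unfold chooseFlask chooseFlask_alt
  have hs := PySem.List.sorted_pairwise requirements (fun x => x)
  have hg : GoodMemo (PySem.List.sorted requirements (fun x => x)) PySem.Dict.empty := by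
    intro k v h; rw [PySem.Dict.get?_empty] at h; cases h
  exact congrArg Prod.snd (outer_eq (groupByFlask markings) ((PySem.List.max? requirements (fun x => x)).getD 0)
    (PySem.List.sorted requirements (fun x => x)) hs
    (PySem.List.pyRange 0 flaskTypes) PySem.Dict.empty none (-1) hg)
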